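-- pv_equiv track=rewrite | github.com/dengguojie/vue-element-admin | ops/built-in/tbe/impl/gather_nd.py | _move_length_indice_per_unit
-- ===== SOURCE A (Python) =====
-- def _move_length_indice_per_unit(shape_data, shape_indices):
--     """
--     calculate move length indice per unit
--     """
--     last_indice_dim = shape_indices[-1]
--     shape_data_size = len(shape_data)
--     diff_num = abs(shape_data_size - last_indice_dim)
--     total_data_shape = 1
--     part_data_shape = 1
--     data_part = 1
--     for data_dim in shape_data:
--         total_data_shape *= data_dim
--     for i in range(0, shape_data_size - diff_num):
--         part_data_shape *= shape_data[i]
--     data_part = total_data_shape // part_data_shape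
--     return data_part
-- ===== SOURCE B (Python) =====
-- def _move_length_indice_per_unit(shape_data, shape_indices):
--     """
--     calculate move length indice per unit
--     """
--     last_indice_dim = shape_indices[-1]
--     shape_data_size = len(shape_data)
--     start = max(0, shape_data_size - abs(shape_data_size - last_indice_dim))
--     data_part = 1
--     for data_dim in shape_data[start:]:
--         data_part *= data_dim
--     return data_part
-- ===== Notes on version B (the rewrite author's own statement) =====
-- stated objective: simpler
-- what changed: B multiplies only the trailing dims shape_data[start:] in one loop (start clamped to 0), instead of computing the total product and a prefix product and floor-dividing them.
import Mathlib
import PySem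

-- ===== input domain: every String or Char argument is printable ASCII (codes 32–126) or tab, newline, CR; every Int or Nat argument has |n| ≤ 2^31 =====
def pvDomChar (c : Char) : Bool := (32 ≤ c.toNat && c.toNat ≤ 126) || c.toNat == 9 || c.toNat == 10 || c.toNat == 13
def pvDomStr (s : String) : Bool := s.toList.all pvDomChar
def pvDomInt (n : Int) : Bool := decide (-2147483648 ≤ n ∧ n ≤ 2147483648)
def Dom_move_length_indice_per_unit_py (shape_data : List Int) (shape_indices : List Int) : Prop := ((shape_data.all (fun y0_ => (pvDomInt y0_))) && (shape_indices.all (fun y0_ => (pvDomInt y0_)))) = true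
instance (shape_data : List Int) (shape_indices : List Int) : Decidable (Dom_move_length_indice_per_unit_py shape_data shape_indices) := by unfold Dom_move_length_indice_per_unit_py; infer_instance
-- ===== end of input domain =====

-- B computes the product of the trailing dims shape_data[max(0, n - |n - last|):] in one loop,
-- instead of A's total product divided by a prefix product (objective: simpler).

-- ===== PORT A =====
def move_length_indice_per_unit_py (shape_data : List Int) (shape_indices : List Int) : Int :=
  let last_indice_dim := PySem.List.pyGetD shape_indices (-1) 0
  let shape_data_size : Int := PySem.List.len shape_data
  let diff_num := |shape_data_size - last_indice_dim|
  let total_data_shape := shape_data.foldl (fun acc data_dim => acc * data_dim) 1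
  let part_data_shape := (PySem.List.pyRange 0 (shape_data_size - diff_num)).foldl
      (fun acc i => acc * PySem.List.pyGetD shape_data i 1) 1
  PySem.Int.floordiv total_data_shape part_data_shape

-- ===== PORT B =====
def move_length_indice_per_unit_py_alt (shape_data : List Int) (shape_indices : List Int) : Int :=
  let last_indice_dim := PySem.List.pyGetD shape_indices (-1) 0
  let shape_data_size : Int := PySem.List.len shape_data
  let start := max 0 (shape_data_size - |shape_data_size - last_indice_dim|)
  (PySem.List.slice shape_data (some start)).foldl (fun acc data_dim => acc * data_dim) 1

-- ===== PRECONDITION & SPEC =====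
-- Pre_ excludes (a) empty shape_indices, where A raises IndexError on shape_indices[-1], and
-- (b) inputs whose prefix shape_data[:n - |n - last|] contains a 0, where A computes 0 // 0 and
-- raises ZeroDivisionError.
def Pre_move_length_indice_per_unit_py (shape_data : List Int) (shape_indices : List Int) : Prop :=
  shape_indices ≠ [] ∧
  (0 : Int) ∉ shape_data.take
    (((shape_data.length : Int) - |(shape_data.length : Int) - (shape_indices.getLast?.getD 0)|).toNat)
instance (shape_data : List Int) (shape_indices : List Int) : Decidable (Pre_move_length_indice_per_unit_py shape_data shape_indices) := by unfold Pre_move_length_indice_per_unit_py; infer_instance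

def pvWitness_move_length_indice_per_unit_py : List Int × List Int := ([2, 3], [1])

def Spec_move_length_indice_per_unit_py (shape_data : List Int) (shape_indices : List Int) (out : Int) : Prop := out = move_length_indice_per_unit_py_alt shape_data shape_indices
instance (shape_data : List Int) (shape_indices : List Int) (out : Int) : Decidable (Spec_move_length_indice_per_unit_py shape_data shape_indices out) := by unfold Spec_move_length_indice_per_unit_py; infer_instance

-- ===== CLAIM (what is proved, stated in full; the proofs are below) =====
def Claim_equal_move_length_indice_per_unit_py : Prop := ∀ (shape_data : List Int) (shape_indices : List Int), Dom_move_length_indice_per_unit_py shape_data shape_indices → Pre_move_length_indice_per_unit_py shape_data shape_indices → Spec_move_length_indice_per_unit_py shape_data shape_indices (move_length_indice_per_unit_py shape_data shape_indices)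

-- ===== LEMMAS AND PROOFS =====

-- A's index loop over range(0, m) multiplies exactly the first m dims.
lemma foldl_range_mul_take (xs : List Int) (n : Nat) (hn : n ≤ xs.length) :
    (PySem.List.pyRange 0 (n : Int)).foldl (fun acc i => acc * PySem.List.pyGetD xs i 1) 1
      = (xs.take n).prod := by
  induction n with
  | zero => simp [PySem.List.pyRange]
  | succ k ih =>
    have hk : k < xs.length := by omega
    rw [show ((k + 1 : Nat) : Int) = (k : Int) + 1 by push_cast; ring,
        PySem.List.pyRange_one_succ_right (by positivity)]
    rw [List.foldl_append, ih (by omega)]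
    have hget : PySem.List.pyGetD xs ((k : Nat) : Int) 1 = xs[k] := by
      rw [PySem.List.pyGetD_natCast]
      exact List.getD_eq_getElem xs 1 hk
    simp only [List.foldl_cons, List.foldl_nil, hget]
    rw [List.prod_take_succ xs k hk]

theorem move_length_indice_per_unit_py_spec : Claim_equal_move_length_indice_per_unit_py := by
  intro sd si _hdom hpre
  obtain ⟨hne, hz⟩ := hpre
  unfold Spec_move_length_indice_per_unit_py
  unfold move_length_indice_per_unit_py move_length_indice_per_unit_py_alt
  simp only [PySem.List.len]
  set L := PySem.List.pyGetD si (-1) 0 with hL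
  have hLv : L = si.getLast?.getD 0 := by
    rw [hL, PySem.List.pyGetD_neg_one si 0 hne, List.getLast?_eq_some_getLast hne]
    rfl
  set m : Int := (sd.length : Int) - |(sd.length : Int) - L| with hm
  have habs : 0 ≤ |(sd.length : Int) - L| := abs_nonneg _
  have hml : m.toNat ≤ sd.length := by omega
  have hstart : (max 0 m).toNat = m.toNat := by omega
  -- B's side: trailing slice product
  have hB : (PySem.List.slice sd (some (max 0 m))).foldl (fun acc d => acc * d) 1
      = (sd.drop m.toNat).prod := by
    rw [PySem.List.slice_from sd (le_max_left 0 m), hstart]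
    simp [← List.prod_eq_foldl]
  -- A's side
  have hrange : PySem.List.pyRange 0 m = PySem.List.pyRange 0 (m.toNat : Int) := by
    by_cases h : 0 ≤ m
    · rw [Int.toNat_of_nonneg h]
    · rw [show m.toNat = 0 by omega]
      simp [PySem.List.pyRange, show m ≤ 0 by omega]
  have hpart : (PySem.List.pyRange 0 m).foldl (fun acc i => acc * PySem.List.pyGetD sd i 1) 1
      = (sd.take m.toNat).prod := by
    rw [hrange, foldl_range_mul_take sd m.toNat hml]
  have htot : sd.foldl (fun acc d => acc * d) 1 = (sd.take m.toNat).prod * (sd.drop m.toNat).prod := by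
    rw [← List.prod_eq_foldl, ← List.prod_append, List.take_append_drop]
  have hpz : (sd.take m.toNat).prod ≠ 0 := by
    apply List.prod_ne_zero
    rw [← hLv] at hz
    exact hz
  rw [hB, hpart, htot]
  simp only [PySem.Int.floordiv]
  exact Int.mul_fdiv_cancel_left _ hpz
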